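-- pv_equiv track=rewrite | github.com/madr1d-siuu/2practic-ky | testrepo.py | build_full_graph
-- ===== SOURCE A (Python) =====
-- from typing import Dict, List, Set, Optional
--
-- def build_full_graph(root: str, repo: Dict[str, List[str]], filter_substr: str) -> Dict[str, List[str]]:
--     """
--     Строит полный граф зависимостей из тестового репозитория DFS-обходом с рекурсией.
--     - Игнорирует узлы (кроме root), чьё имя содержит filter_substr.
--     - Корректно обрабатывает циклы.
--     - Если root отсутствует в repo — KeyError(root).
--     Возвращает adjacency list: {узел: [его прямые зависимости]}.
--     """
--     if root not in repo:
--         raise KeyError(root)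
--
--     graph: Dict[str, List[str]] = {}
--     visited: Set[str] = set()
--     rec_stack: Set[str] = set()
--     flt = (filter_substr or "").strip()
--
--     def dfs(pkg: str) -> None:
--         if pkg in rec_stack:
--             return
--         if pkg in visited:
--             return
--         if flt and pkg != root and flt in pkg:
--             return
--
--         visited.add(pkg)
--         rec_stack.add(pkg)
--
--         deps = repo.get(pkg, [])
--         kept_children: List[str] = []
--         for d in deps:
--             if flt and flt in d:
--                 continue
--             kept_children.append(d)
--             dfs(d)
--
--         graph[pkg] = kept_children
--         rec_stack.remove(pkg)
--
--     dfs(root)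
--     return graph
-- ===== SOURCE B (Python) =====
-- def build_full_graph(root, repo, filter_substr):
--     """Iterative explicit-stack DFS (post-order finish tasks) instead of recursion;
--     drops the redundant rec_stack — visited alone prevents re-entry."""
--     if root not in repo:
--         raise KeyError(root)
--     flt = (filter_substr or "").strip()
--     graph = {}
--     visited = set()
--     tasks = [("visit", root, None)]
--     while tasks:
--         kind, pkg, kept = tasks.pop()
--         if kind == "finish":
--             graph[pkg] = kept
--         elif pkg in visited:
--             pass
--         elif flt and pkg != root and flt in pkg:
--             pass
--         else:
--             visited.add(pkg)
--             kept = [d for d in repo.get(pkg, []) if not (flt and flt in d)]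
--             tasks.append(("finish", pkg, kept))
--             for d in reversed(kept):
--                 tasks.append(("visit", d, None))
--     return graph
-- ===== Notes on version B (the rewrite author's own statement) =====
-- stated objective: alternative
-- what changed: The recursive DFS with a mutated graph/visited/rec_stack closure is replaced by an iterative DFS over an explicit worklist of visit/finish tasks: the redundant rec_stack is dropped (visited alone prevents re-entry) and each node's adjacency entry is written when its 'finish' task is popped, reproducing A's post-order insertion exactly.
import Mathlib
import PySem

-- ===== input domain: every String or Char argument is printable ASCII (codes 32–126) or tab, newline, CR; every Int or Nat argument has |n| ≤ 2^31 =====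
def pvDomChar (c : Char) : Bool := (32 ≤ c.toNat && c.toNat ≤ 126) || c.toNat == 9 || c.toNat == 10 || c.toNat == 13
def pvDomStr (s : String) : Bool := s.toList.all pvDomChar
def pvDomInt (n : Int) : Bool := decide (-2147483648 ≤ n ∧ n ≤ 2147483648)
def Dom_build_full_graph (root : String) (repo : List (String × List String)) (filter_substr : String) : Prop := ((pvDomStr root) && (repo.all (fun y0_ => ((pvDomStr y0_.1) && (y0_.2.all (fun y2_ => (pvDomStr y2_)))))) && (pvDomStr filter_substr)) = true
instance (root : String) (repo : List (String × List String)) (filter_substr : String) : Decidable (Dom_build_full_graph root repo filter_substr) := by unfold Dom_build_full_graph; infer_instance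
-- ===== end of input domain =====

-- B re-implements the recursive DFS as an iterative explicit-stack DFS (visit/finish
-- worklist), dropping the redundant rec_stack; same return value, proved below.

-- ===== PORT A =====
-- state of A's dfs closure: (graph, visited, rec_stack)
abbrev pvStA : Type := PySem.Dict String (List String) × PySem.Set String × PySem.Set String

-- the recursive dfs of A (fuel makes the recursion total; `none` = fuel ran out,
-- proved unreachable for the fuel build_full_graph passes).  dfsDepsA is the
-- `for d in deps` loop body, threading the kept_children accumulator and the state.
mutual
def dfsA (repo : List (String × List String)) (root flt : String) :
    Nat → String → pvStA → Option pvStA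
  | 0, _, _ => none
  | fuel + 1, pkg, (g, vis, rec) =>
    if PySem.Set.contains rec pkg then some (g, vis, rec)
    else if PySem.Set.contains vis pkg then some (g, vis, rec)
    else if (flt != "") && (pkg != root) && PySem.Str.isIn flt pkg then some (g, vis, rec)
    else
      let vis1 := PySem.Set.add vis pkg
      let rec1 := PySem.Set.add rec pkg
      let deps := PySem.Dict.getD (PySem.Dict.mk repo) pkg []
      match dfsDepsA repo root flt fuel deps ([], g, vis1, rec1) with
      | none => none
      | some (kept, g2, vis2, rec2) =>
          -- rec_stack.remove(pkg): pkg is always present, set.remove = discard then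
          some (PySem.Dict.insert g2 pkg kept, vis2, PySem.Set.discard rec2 pkg)
termination_by fuel _ _ => (fuel, 0)

def dfsDepsA (repo : List (String × List String)) (root flt : String) :
    Nat → List String → List String × pvStA → Option (List String × pvStA)
  | _, [], acc => some acc
  | fuel, d :: ds, (kept, st) =>
    if (flt != "") && PySem.Str.isIn flt d then dfsDepsA repo root flt fuel ds (kept, st)
    else
      match dfsA repo root flt fuel d st with
      | none => none
      | some st' => dfsDepsA repo root flt fuel ds (kept ++ [d], st')
termination_by fuel ds _ => (fuel, ds.length + 1)
end

def build_full_graph (root : String) (repo : List (String × List String)) (filter_substr : String) : List (String × List String) :=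
  if PySem.Dict.contains (PySem.Dict.mk repo) root = false then []   -- Python raises KeyError(root); excluded by Pre_
  else
    let flt := PySem.Str.strip filter_substr   -- (filter_substr or "").strip()
    let fuel := (root :: repo.flatMap (fun p => p.2)).length + 1
    match dfsA repo root flt fuel root (PySem.Dict.empty, PySem.Set.empty, PySem.Set.empty) with
    | some (g, _, _) => PySem.Dict.items g
    | none => []   -- unreachable: the fuel above always suffices (proved below)

-- ===== PORT B =====
-- a task is ("visit"|"finish", pkg, kept); list head = top of Python's stack
abbrev pvTaskB : Type := String × String × Option (List String)

-- needed by loopB's decreasing_by: children looked up in the repo are repo values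
theorem pv_mem_getD_flatMap (repo : List (String × List String)) (pkg d : String)
    (h : d ∈ PySem.Dict.getD (PySem.Dict.mk repo) pkg []) :
    d ∈ repo.flatMap (fun p => p.2) := by
  induction repo with
  | nil => simp [PySem.Dict.getD, PySem.Dict.get?] at h
  | cons p rest ih =>
    rw [PySem.Dict.getD_eq_get?_getD, PySem.Dict.get?_mk_cons] at h
    by_cases hk : p.1 == pkg
    · simp [hk] at h
      exact List.mem_flatMap.2 ⟨p, List.mem_cons_self .., h⟩
    · simp only [hk, Bool.false_eq_true, if_false] at h
      rw [← PySem.Dict.getD_eq_get?_getD] at h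
      simp only [List.flatMap_cons, List.mem_append]
      exact Or.inr (ih h)

-- the while-loop of B; terminates because every expansion marks a new node visited
def loopB (repo : List (String × List String)) (root flt : String) :
    List pvTaskB → PySem.Dict String (List String) → PySem.Set String →
    PySem.Dict String (List String)
  | [], g, _ => g
  | (kind, pkg, kept?) :: rest, g, vis =>
    if kind == "finish" then
      loopB repo root flt rest (PySem.Dict.insert g pkg (kept?.getD [])) vis
    else if PySem.Set.contains vis pkg then
      loopB repo root flt rest g vis
    else if (flt != "") && (pkg != root) && PySem.Str.isIn flt pkg then
      loopB repo root flt rest g vis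
    else
      let kept := (PySem.Dict.getD (PySem.Dict.mk repo) pkg []).filter
        (fun d => !((flt != "") && PySem.Str.isIn flt d))
      loopB repo root flt
        (kept.map (fun d => ("visit", d, (none : Option (List String)))) ++ ("finish", pkg, some kept) :: rest)
        g (PySem.Set.add vis pkg)
termination_by
  stack _ vis =>
    ((((stack.map (fun t => t.2.1)) ++ root :: repo.flatMap (fun p => p.2)).toFinset \ vis.toFinset).card,
     stack.length)
decreasing_by
  · apply Prod.Lex.right'
    · apply Finset.card_le_card
      apply Finset.sdiff_subset_sdiff _ subset_rfl
      intro x hx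
      simp only [List.toFinset_append, List.mem_toFinset, Finset.mem_union, List.map_cons,
        List.mem_cons, List.mem_map] at hx ⊢
      rcases hx with h | h
      · exact Or.inl (Or.inr h)
      · exact Or.inr h
    · simp
  · apply Prod.Lex.right'
    · apply Finset.card_le_card
      apply Finset.sdiff_subset_sdiff _ subset_rfl
      intro x hx
      simp only [List.toFinset_append, List.mem_toFinset, Finset.mem_union, List.map_cons,
        List.mem_cons, List.mem_map] at hx ⊢
      rcases hx with h | h
      · exact Or.inl (Or.inr h)
      · exact Or.inr h
    · simp
  · apply Prod.Lex.right'
    · apply Finset.card_le_card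
      apply Finset.sdiff_subset_sdiff _ subset_rfl
      intro x hx
      simp only [List.toFinset_append, List.mem_toFinset, Finset.mem_union, List.map_cons,
        List.mem_cons, List.mem_map] at hx ⊢
      rcases hx with h | h
      · exact Or.inl (Or.inr h)
      · exact Or.inr h
    · simp
  · apply Prod.Lex.left
    apply Finset.card_lt_card
    have hpkg : pkg ∉ vis := by
      intro hm
      have := (PySem.Set.contains_iff vis pkg).2 hm
      simp_all
    refine (Finset.ssubset_iff_of_subset ?_).2 ⟨pkg, ?_, ?_⟩
    · refine Finset.sdiff_subset_sdiff ?_ ?_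
      · intro x hx
        simp only [List.map_append, List.map_map, List.map_cons, List.toFinset_append,
          Finset.mem_union, List.mem_toFinset, List.mem_cons, List.mem_map,
          Function.comp, List.mem_filter] at hx ⊢
        rcases hx with (⟨a, ⟨ha, _⟩, rfl⟩ | hx) | hx
        · exact Or.inr (Or.inr (pv_mem_getD_flatMap repo pkg _ ha))
        · rcases hx with rfl | hx
          · exact Or.inl (Or.inl rfl)
          · exact Or.inl (Or.inr hx)
        · exact Or.inr hx
      · intro x hx
        simp only [List.mem_toFinset] at hx ⊢
        exact (PySem.Set.mem_add vis pkg x).2 (Or.inl hx)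
    · simp only [Finset.mem_sdiff, List.toFinset_append, Finset.mem_union,
        List.mem_toFinset, List.map_cons, List.mem_cons]
      exact ⟨Or.inl (Or.inl trivial), hpkg⟩
    · simp only [Finset.mem_sdiff, List.mem_toFinset]
      intro h
      exact h.2 ((PySem.Set.mem_add vis pkg pkg).2 (Or.inr rfl))

def build_full_graph_alt (root : String) (repo : List (String × List String)) (filter_substr : String) : List (String × List String) :=
  if PySem.Dict.contains (PySem.Dict.mk repo) root = false then []   -- Python raises KeyError(root); excluded by Pre_
  else
    let flt := PySem.Str.strip filter_substr   -- (filter_substr or "").strip()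
    PySem.Dict.items
      (loopB repo root flt [("visit", root, (none : Option (List String)))] PySem.Dict.empty PySem.Set.empty)

-- ===== PRECONDITION & SPEC =====
-- Pre_ excludes exactly the inputs where Python A raises KeyError: root not a key of repo.
def Pre_build_full_graph (root : String) (repo : List (String × List String)) (filter_substr : String) : Prop :=
  PySem.Dict.contains (PySem.Dict.mk repo) root = true
instance (root : String) (repo : List (String × List String)) (filter_substr : String) : Decidable (Pre_build_full_graph root repo filter_substr) := by unfold Pre_build_full_graph; infer_instance

def pvWitness_build_full_graph : String × (List (String × List String)) × String :=
  ("a", [("a", ["b"]), ("b", ["a"])], "")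

def Spec_build_full_graph (root : String) (repo : List (String × List String)) (filter_substr : String) (out : List (String × List String)) : Prop := out = build_full_graph_alt root repo filter_substr
instance (root : String) (repo : List (String × List String)) (filter_substr : String) (out : List (String × List String)) : Decidable (Spec_build_full_graph root repo filter_substr out) := by unfold Spec_build_full_graph; infer_instance

-- ===== CLAIM (what is proved, stated in full; the proofs are below) =====
def Claim_equal_build_full_graph : Prop := ∀ (root : String) (repo : List (String × List String)) (filter_substr : String), Dom_build_full_graph root repo filter_substr → Pre_build_full_graph root repo filter_substr → Spec_build_full_graph root repo filter_substr (build_full_graph root repo filter_substr)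

-- ===== LEMMAS AND PROOFS =====

-- removing the element just added to a set gives the set back
theorem pv_discard_add {α : Type} [BEq α] [LawfulBEq α] (s : PySem.Set α) (x : α)
    (h : x ∉ s) : PySem.Set.discard (PySem.Set.add s x) x = s := by
  have hc : s.contains x = false := by
    rw [← Bool.not_eq_true, PySem.Set.contains_iff]; exact h
  simp only [PySem.Set.discard, PySem.Set.add, hc, Bool.false_eq_true, if_false,
    List.filter_append]
  have h1 : s.filter (fun y => !y == x) = s :=
    List.filter_eq_self.2 (fun y hy => by simp; rintro rfl; exact h hy)
  have h2 : [x].filter (fun y => !y == x) = [] := by simp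
  rw [h1, h2, List.append_nil]

-- preservation: a successful dfsA call leaves rec_stack unchanged and only grows visited
theorem pvPD (repo : List (String × List String)) (root flt : String) (f : Nat)
    (hA : ∀ pkg st out, dfsA repo root flt f pkg st = some out →
      out.2.2 = st.2.2 ∧ ∀ x ∈ st.2.1, x ∈ out.2.1) :
    ∀ ds acc out, dfsDepsA repo root flt f ds acc = some out →
      out.2.2.2 = acc.2.2.2 ∧ ∀ x ∈ acc.2.2.1, x ∈ out.2.2.1 := by
  intro ds
  induction ds with
  | nil =>
    intro acc out h
    rw [dfsDepsA] at h
    cases h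
    exact ⟨rfl, fun x hx => hx⟩
  | cons d ds ih =>
    intro acc out h
    obtain ⟨kept, g, vis, rec⟩ := acc
    rw [dfsDepsA] at h
    split at h
    · exact ih _ _ h
    · cases hcall : dfsA repo root flt f d (g, vis, rec) with
      | none => rw [hcall] at h; cases h
      | some st' =>
        rw [hcall] at h
        obtain ⟨hrec, hvis⟩ := hA d _ _ hcall
        obtain ⟨hrec', hvis'⟩ := ih _ _ h
        exact ⟨by rw [hrec', hrec], fun x hx => hvis' x (hvis x hx)⟩

theorem pvPA (repo : List (String × List String)) (root flt : String) :
    ∀ (f : Nat) pkg st out, dfsA repo root flt f pkg st = some out →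
      out.2.2 = st.2.2 ∧ ∀ x ∈ st.2.1, x ∈ out.2.1 := by
  intro f
  induction f with
  | zero => intro pkg st out h; rw [dfsA] at h; cases h
  | succ f ih =>
    intro pkg st out h
    obtain ⟨g, vis, rec⟩ := st
    rw [dfsA] at h
    dsimp only at h
    split at h
    · cases h; exact ⟨rfl, fun x hx => hx⟩
    · split at h
      · cases h; exact ⟨rfl, fun x hx => hx⟩
      · split at h
        · cases h; exact ⟨rfl, fun x hx => hx⟩
        · rename_i hrec hvis hflt
          cases hm : dfsDepsA repo root flt f (PySem.Dict.getD (PySem.Dict.mk repo) pkg [])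
              ([], g, PySem.Set.add vis pkg, PySem.Set.add rec pkg) with
          | none => rw [hm] at h; cases h
          | some acc' =>
            rw [hm] at h
            obtain ⟨kept, g2, vis2, rec2⟩ := acc'
            cases h
            obtain ⟨hrec', hvis'⟩ := pvPD repo root flt f ih _ _ _ hm
            have hpkg : pkg ∉ rec := by
              intro hx
              exact absurd ((PySem.Set.contains_iff rec pkg).2 hx) (by simpa using hrec)
            refine ⟨?_, ?_⟩
            · show PySem.Set.discard rec2 pkg = rec
              rw [show rec2 = PySem.Set.add rec pkg from hrec']
              exact pv_discard_add rec pkg hpkg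
            · intro x hx
              exact hvis' x ((PySem.Set.mem_add vis pkg x).2 (Or.inl hx))

-- the fuel measure: unvisited part of the node universe
def pvM (repo : List (String × List String)) (root : String) (vis : PySem.Set String) : Nat :=
  (((root :: repo.flatMap (fun p => p.2)).toFinset) \ vis.toFinset).card

theorem pvM_mono (repo : List (String × List String)) (root : String)
    (vis vis' : PySem.Set String) (h : ∀ x ∈ vis, x ∈ vis') :
    pvM repo root vis' ≤ pvM repo root vis := by
  apply Finset.card_le_card
  apply Finset.sdiff_subset_sdiff subset_rfl
  intro x hx
  simp only [List.mem_toFinset] at hx ⊢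
  exact h x hx

theorem pvM_add_lt (repo : List (String × List String)) (root : String)
    (vis : PySem.Set String) (pkg : String)
    (hu : pkg ∈ root :: repo.flatMap (fun p => p.2)) (hv : pkg ∉ vis) :
    pvM repo root (PySem.Set.add vis pkg) < pvM repo root vis := by
  apply Finset.card_lt_card
  refine (Finset.ssubset_iff_of_subset ?_).2 ⟨pkg, ?_, ?_⟩
  · apply Finset.sdiff_subset_sdiff subset_rfl
    intro x hx
    simp only [List.mem_toFinset] at hx ⊢
    exact (PySem.Set.mem_add vis pkg x).2 (Or.inl hx)
  · simp only [Finset.mem_sdiff, List.mem_toFinset]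
    exact ⟨hu, hv⟩
  · simp only [Finset.mem_sdiff, List.mem_toFinset]
    intro hcon
    exact hcon.2 ((PySem.Set.mem_add vis pkg pkg).2 (Or.inr rfl))

-- adequacy: with fuel above the measure, dfsA cannot run out of fuel
theorem pvADD (repo : List (String × List String)) (root flt : String) (f : Nat)
    (hA : ∀ pkg (g : PySem.Dict String (List String)) vis rec, pkg ∈ root :: repo.flatMap (fun p => p.2) →
      pvM repo root vis < f → (dfsA repo root flt f pkg (g, vis, rec)).isSome) :
    ∀ ds kept (g : PySem.Dict String (List String)) vis rec,
      (∀ d ∈ ds, d ∈ root :: repo.flatMap (fun p => p.2)) →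
      pvM repo root vis < f →
      (dfsDepsA repo root flt f ds (kept, (g, vis, rec))).isSome := by
  intro ds
  induction ds with
  | nil => intro kept g vis rec _ _; rw [dfsDepsA]; rfl
  | cons d ds ih =>
    intro kept g vis rec hu hm
    rw [dfsDepsA]
    split
    · exact ih kept g vis rec (fun x hx => hu x (List.mem_cons_of_mem d hx)) hm
    · cases hcall : dfsA repo root flt f d (g, vis, rec) with
      | none =>
        have := hA d g vis rec (hu d (List.mem_cons_self ..)) hm
        rw [hcall] at this; cases this
      | some st' =>
        obtain ⟨g2, vis2, rec2⟩ := st'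
        obtain ⟨-, hgrow⟩ := pvPA repo root flt f d _ _ hcall
        exact ih _ g2 vis2 rec2 (fun x hx => hu x (List.mem_cons_of_mem d hx))
          (lt_of_le_of_lt (pvM_mono repo root vis vis2 hgrow) hm)

theorem pvADA (repo : List (String × List String)) (root flt : String) :
    ∀ (f : Nat) pkg (g : PySem.Dict String (List String)) vis rec,
      pkg ∈ root :: repo.flatMap (fun p => p.2) →
      pvM repo root vis < f →
      (dfsA repo root flt f pkg (g, vis, rec)).isSome := by
  intro f
  induction f with
  | zero => intro pkg g vis rec _ hm; omega
  | succ f ih =>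
    intro pkg g vis rec hu hm
    rw [dfsA]
    dsimp only
    split
    · rfl
    · split
      · rfl
      · split
        · rfl
        · rename_i hrec hvis hflt
          have hpkg : pkg ∉ vis := by
            intro hx
            exact absurd ((PySem.Set.contains_iff vis pkg).2 hx) (by simpa using hvis)
          have hdeps : ∀ d ∈ PySem.Dict.getD (PySem.Dict.mk repo) pkg [],
              d ∈ root :: repo.flatMap (fun p => p.2) :=
            fun d hd => List.mem_cons_of_mem root (pv_mem_getD_flatMap repo pkg d hd)
          have hm' : pvM repo root (PySem.Set.add vis pkg) < f := by
            have := pvM_add_lt repo root vis pkg hu hpkg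
            omega
          have := pvADD repo root flt f ih _ []
            g (PySem.Set.add vis pkg) (PySem.Set.add rec pkg) hdeps hm'
          cases hcall : dfsDepsA repo root flt f (PySem.Dict.getD (PySem.Dict.mk repo) pkg [])
              ([], g, PySem.Set.add vis pkg, PySem.Set.add rec pkg) with
          | none => rw [hcall] at this; cases this
          | some acc' =>
            obtain ⟨kept, g2, vis2, rec2⟩ := acc'
            rfl

-- simulation: one dfsA call equals processing one "visit" task (and its whole subtree)
theorem pvSD (repo : List (String × List String)) (root flt : String) (f : Nat)
    (hA : ∀ pkg (g : PySem.Dict String (List String)) vis rec out,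
      dfsA repo root flt f pkg (g, vis, rec) = some out → (∀ x ∈ rec, x ∈ vis) →
      ∀ stack, loopB repo root flt (("visit", pkg, none) :: stack) g vis = loopB repo root flt stack out.1 out.2.1) :
    ∀ ds kept (g : PySem.Dict String (List String)) vis rec out,
      dfsDepsA repo root flt f ds (kept, (g, vis, rec)) = some out → (∀ x ∈ rec, x ∈ vis) →
      out.1 = kept ++ ds.filter (fun d => !((flt != "") && PySem.Str.isIn flt d)) ∧
      ∀ stack, loopB repo root flt
          ((ds.filter (fun d => !((flt != "") && PySem.Str.isIn flt d))).map (fun d => ("visit", d, (none : Option (List String)))) ++ stack) g vis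
        = loopB repo root flt stack out.2.1 out.2.2.1 := by
  intro ds
  induction ds with
  | nil =>
    intro kept g vis rec out h hinv
    rw [dfsDepsA] at h
    cases h
    exact ⟨by simp, fun stack => by simp⟩
  | cons d ds ih =>
    intro kept g vis rec out h hinv
    rw [dfsDepsA] at h
    split at h
    · rename_i hcond
      have hfil : (d :: ds).filter (fun d => !((flt != "") && PySem.Str.isIn flt d))
          = ds.filter (fun d => !((flt != "") && PySem.Str.isIn flt d)) := by
        simp only [List.filter_cons, hcond, Bool.not_true, Bool.false_eq_true, if_false]
      obtain ⟨h1, h2⟩ := ih _ _ _ _ _ h hinv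
      exact ⟨by rw [h1, hfil], fun stack => by rw [hfil]; exact h2 stack⟩
    · rename_i hcond
      have hc : ((flt != "") && PySem.Str.isIn flt d) = false := by
        simpa using hcond
      have hfil : (d :: ds).filter (fun d => !((flt != "") && PySem.Str.isIn flt d))
          = d :: ds.filter (fun d => !((flt != "") && PySem.Str.isIn flt d)) := by
        simp only [List.filter_cons, hc, Bool.not_false, if_true]
      cases hcall : dfsA repo root flt f d (g, vis, rec) with
      | none => rw [hcall] at h; cases h
      | some st1 =>
        rw [hcall] at h
        obtain ⟨g1, vis1, rec1⟩ := st1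
        obtain ⟨hrec1, hgrow⟩ := pvPA repo root flt f d _ _ hcall
        have hinv1 : ∀ x ∈ rec1, x ∈ vis1 := by
          intro x hx
          exact hgrow x (hinv x (by rwa [show rec1 = rec from hrec1] at hx))
        obtain ⟨h1, h2⟩ := ih _ _ _ _ _ h hinv1
        refine ⟨by rw [h1, hfil]; simp, ?_⟩
        intro stack
        rw [hfil]
        simp only [List.map_cons, List.cons_append]
        rw [hA d g vis rec _ hcall hinv
          (((ds.filter (fun d => !((flt != "") && PySem.Str.isIn flt d))).map
            (fun d => ("visit", d, (none : Option (List String))))) ++ stack)]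
        exact h2 stack

theorem pvSA (repo : List (String × List String)) (root flt : String) :
    ∀ (f : Nat) pkg (g : PySem.Dict String (List String)) vis rec out,
      dfsA repo root flt f pkg (g, vis, rec) = some out → (∀ x ∈ rec, x ∈ vis) →
      ∀ stack, loopB repo root flt (("visit", pkg, none) :: stack) g vis = loopB repo root flt stack out.1 out.2.1 := by
  intro f
  induction f with
  | zero => intro pkg g vis rec out h; rw [dfsA] at h; cases h
  | succ f ih =>
    intro pkg g vis rec out h hinv stack
    rw [dfsA] at h
    dsimp only at h
    split at h
    · rename_i hrec
      cases h
      have hc : PySem.Set.contains vis pkg = true :=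
        (PySem.Set.contains_iff vis pkg).2 (hinv pkg ((PySem.Set.contains_iff rec pkg).1 hrec))
      rw [loopB, if_neg (by decide), if_pos hc]
    · split at h
      · rename_i hvis
        cases h
        rw [loopB, if_neg (by decide), if_pos hvis]
      · split at h
        · rename_i hrec hvis hflt
          cases h
          rw [loopB, if_neg (by decide), if_neg hvis, if_pos hflt]
        · rename_i hrec hvis hflt
          cases hm : dfsDepsA repo root flt f (PySem.Dict.getD (PySem.Dict.mk repo) pkg [])
              ([], g, PySem.Set.add vis pkg, PySem.Set.add rec pkg) with
          | none => rw [hm] at h; cases h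
          | some acc' =>
            rw [hm] at h
            obtain ⟨kept, g2, vis2, rec2⟩ := acc'
            cases h
            have hinv1 : ∀ x ∈ PySem.Set.add rec pkg, x ∈ PySem.Set.add vis pkg := by
              intro x hx
              rcases (PySem.Set.mem_add rec pkg x).1 hx with hx | hx
              · exact (PySem.Set.mem_add vis pkg x).2 (Or.inl (hinv x hx))
              · exact (PySem.Set.mem_add vis pkg x).2 (Or.inr hx)
            obtain ⟨h1, h2⟩ := pvSD repo root flt f ih _ _ _ _ _ _ hm hinv1
            simp only [List.nil_append] at h1
            rw [loopB, if_neg (by decide), if_neg hvis, if_neg hflt]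
            dsimp only
            rw [h2 (("finish", pkg,
              some ((PySem.Dict.getD (PySem.Dict.mk repo) pkg []).filter
                (fun d => !((flt != "") && PySem.Str.isIn flt d)))) :: stack)]
            rw [loopB, if_pos (by decide)]
            rw [h1]
            simp only [Option.getD_some]

-- ===== VERDICT (by name: the statement is the Claim_ definition above) =====
theorem build_full_graph_spec : Claim_equal_build_full_graph := by
  intro root repo filter_substr _ hpre
  unfold Pre_build_full_graph at hpre
  unfold Spec_build_full_graph build_full_graph build_full_graph_alt
  have hco : ¬ (PySem.Dict.contains (PySem.Dict.mk repo) root = false) := by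
    rw [hpre]; simp
  rw [if_neg hco, if_neg hco]
  dsimp only
  have hroot : root ∈ root :: repo.flatMap (fun p => p.2) := List.mem_cons_self ..
  have hm0 : pvM repo root PySem.Set.empty < (root :: repo.flatMap (fun p => p.2)).length + 1 := by
    unfold pvM
    have := List.toFinset_card_le (root :: repo.flatMap (fun p => p.2))
    simp only [PySem.Set.empty, List.toFinset_nil, Finset.sdiff_empty]
    omega
  have hs := pvADA repo root (PySem.Str.strip filter_substr) _ root
    PySem.Dict.empty PySem.Set.empty PySem.Set.empty hroot hm0
  cases hst : dfsA repo root (PySem.Str.strip filter_substr)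
      ((root :: repo.flatMap (fun p => p.2)).length + 1) root
      (PySem.Dict.empty, PySem.Set.empty, PySem.Set.empty) with
  | none => rw [hst] at hs; cases hs
  | some st' =>
    obtain ⟨g, vis, rec⟩ := st'
    have hsim := pvSA repo root (PySem.Str.strip filter_substr) _ root _ _ _ _ hst
      (by intro x hx; cases hx) []
    have hnil : loopB repo root (PySem.Str.strip filter_substr) [] g vis = g := by rw [loopB]
    dsimp only
    rw [hsim, hnil]
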